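-- pv_equiv track=rewrite | github.com/pypi-data/pypi-mirror-60 | packages/mhelper/mhelper-1.0.1.76.tar.gz/mhelper-1.0.1.76/mhelper/array_helper.py | lagged_iterate
-- ===== SOURCE A (Python) =====
-- from typing import List, Optional, Iterator, Tuple, Dict, Iterable, Union, TypeVar, Callable, Sequence, Type, Collection, Reversible, Generic
--
-- T = TypeVar( "T" )
--
-- def lagged_iterate( sequence: Iterable[Optional[T]], head = False, tail = False ) -> Iterator[Tuple[Optional[T], Optional[T]]]:
--     """
--     Yields all adjacent pairs in the sequence.
--
--     :param sequence:        Sequence to iterate over `(0, 1, 2, 3, ..., n)`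
--     :param head:            Include the head element `(None, 0)`. (off by default)
--     :param tail:            Include the tail element `(n, None)`. (off by default)
--     :return:                The iteration: `(0,1), (1,2), (2,3), (...,...), (n-1,n)`
--
--                                 `head`  `tail`      `result when sequence = (1)`     `result when sequence = (1, 2, 3)`
--                                 False   False                                                   (1, 2), (2, 3)
--                                 True    False       (None, 1)                        (None, 1), (1, 2), (2, 3)
--                                 True    True        (None, 1) (1, None)              (None, 1), (1, 2), (2, 3), (3, None)
--                                 False   True                  (1, None)                         (1, 2), (2, 3), (3, None)
--
--     """
--     has_any = 0
--     previous = None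
--
--     for current in sequence:
--         if has_any:
--             yield previous, current
--         elif head:
--             yield None, current
--
--         has_any += 1
--         previous = current
--
--     if tail:
--         yield previous, None
-- ===== SOURCE B (Python) =====
-- def lagged_iterate(sequence, head=False, tail=False):
--     items = list(sequence)
--     if items and head:
--         yield (None, items[0])
--     yield from zip(items, items[1:])
--     if tail:
--         yield (items[-1] if items else None, None)
-- ===== Notes on version B (the rewrite author's own statement) =====
-- stated objective: idiomatic
-- what changed: Replaces single-pass previous/has_any state tracking with materialize-then-positional output: an optional head pair, zip(items, items[1:]) for the adjacent pairs, and an optional tail pair; equivalence is for finite sequences (B materializes the iterable).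
import Mathlib
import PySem

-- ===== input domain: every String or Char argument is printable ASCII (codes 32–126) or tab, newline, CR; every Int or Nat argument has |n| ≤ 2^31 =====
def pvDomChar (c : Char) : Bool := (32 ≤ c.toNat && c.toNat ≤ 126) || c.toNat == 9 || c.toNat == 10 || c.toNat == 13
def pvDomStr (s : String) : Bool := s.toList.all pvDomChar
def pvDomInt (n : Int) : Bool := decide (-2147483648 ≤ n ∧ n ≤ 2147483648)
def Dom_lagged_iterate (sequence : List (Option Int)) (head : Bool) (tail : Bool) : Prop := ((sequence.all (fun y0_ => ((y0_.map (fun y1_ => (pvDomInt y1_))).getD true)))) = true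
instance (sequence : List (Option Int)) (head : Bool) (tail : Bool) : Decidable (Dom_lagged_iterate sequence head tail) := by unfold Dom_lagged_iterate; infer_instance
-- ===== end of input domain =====

-- B materializes the sequence and emits pairs positionally (head pair, offset zip, tail pair)
-- instead of A's running previous/has_any state; equivalence is about the returned list of pairs.

-- ===== PORT A =====
-- state: (accumulated yields, has_any counter, previous)
def lagged_iterate (sequence : List (Option Int)) (head : Bool) (tail : Bool) : List (Option Int × Option Int) :=
  let st := sequence.foldl
    (fun (st : List (Option Int × Option Int) × Int × Option Int) current =>
      let acc := st.1
      let has_any := st.2.1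
      let previous := st.2.2
      let acc := if has_any ≠ 0 then acc ++ [(previous, current)]
                 else if head then acc ++ [(none, current)]
                 else acc
      (acc, has_any + 1, current))
    ([], 0, none)
  if tail then st.1 ++ [(st.2.2, none)] else st.1

-- ===== PORT B =====
def lagged_iterate_alt (sequence : List (Option Int)) (head : Bool) (tail : Bool) : List (Option Int × Option Int) :=
  let items := sequence
  let front : List (Option Int × Option Int) :=
    if head then
      match items with
      | [] => []
      | x :: _ => [(none, x)]
    else []
  let mid := items.zip items.tail
  let back : List (Option Int × Option Int) :=
    if tail then [(items.getLastD none, none)] else []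
  front ++ mid ++ back

-- ===== PRECONDITION & SPEC =====
def Spec_lagged_iterate (sequence : List (Option Int)) (head : Bool) (tail : Bool) (out : List (Option Int × Option Int)) : Prop := out = lagged_iterate_alt sequence head tail
instance (sequence : List (Option Int)) (head : Bool) (tail : Bool) (out : List (Option Int × Option Int)) : Decidable (Spec_lagged_iterate sequence head tail out) := by unfold Spec_lagged_iterate; infer_instance

-- ===== CLAIM (what is proved, stated in full; the proofs are below) =====
def Claim_equal_lagged_iterate : Prop := ∀ (sequence : List (Option Int)) (head : Bool) (tail : Bool), Dom_lagged_iterate sequence head tail → Spec_lagged_iterate sequence head tail (lagged_iterate sequence head tail)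

-- ===== LEMMAS AND PROOFS =====

-- A's loop body, abstracted over `head`
def liStep (head : Bool) (st : List (Option Int × Option Int) × Int × Option Int) (current : Option Int) :
    List (Option Int × Option Int) × Int × Option Int :=
  let acc := st.1
  let has_any := st.2.1
  let previous := st.2.2
  let acc := if has_any ≠ 0 then acc ++ [(previous, current)]
             else if head then acc ++ [(none, current)]
             else acc
  (acc, has_any + 1, current)

-- the last element of x::xs ignores the default; shifting the default by one cons
theorem lastD_shift (xs : List (Option Int)) (x b : Option Int) :
    xs.getLast?.getD x = (x :: xs).getLast?.getD b := by
  induction xs generalizing x b with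
  | nil => simp
  | cons y ys ih => rw [List.getLast?_cons_cons, ← ih y x, ← ih y b]

-- once has_any is positive, the rest of the fold appends exactly the adjacent pairs
theorem liFold_pos (head : Bool) (l : List (Option Int)) :
    ∀ (acc : List (Option Int × Option Int)) (n : Int) (prev : Option Int), 0 < n →
    l.foldl (liStep head) (acc, n, prev)
      = (acc ++ (prev :: l).zip l, n + l.length, l.getLastD prev) := by
  induction l with
  | nil => intro acc n prev _; simp [List.zip]
  | cons x xs ih =>
    intro acc n prev hn
    have hn' : n ≠ 0 := by omega
    simp only [List.foldl_cons, liStep, if_pos hn']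
    rw [ih (acc ++ [(prev, x)]) (n + 1) x (by omega)]
    refine Prod.ext ?_ (Prod.ext ?_ ?_)
    · simp [List.zip_cons_cons]
    · simp; ring
    · simp
      exact lastD_shift xs x prev

theorem lagged_iterate_eq (sequence : List (Option Int)) (head tail : Bool) :
    lagged_iterate sequence head tail = lagged_iterate_alt sequence head tail := by
  cases sequence with
  | nil =>
    cases head <;> cases tail <;> rfl
  | cons x xs =>
    show (let st := (x :: xs).foldl (liStep head) ([], 0, none);
          if tail then st.1 ++ [(st.2.2, none)] else st.1) = _
    simp only [List.foldl_cons]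
    have hstep : liStep head ([], 0, none) x
        = ((if head then [(none, x)] else []), 1, x) := by
      cases head <;> rfl
    rw [hstep, liFold_pos head xs _ 1 x (by omega)]
    cases head <;> cases tail <;>
      simp [lagged_iterate_alt, lastD_shift xs x none]

-- ===== VERDICT (by name: the statement is the Claim_ definition above) =====
theorem lagged_iterate_spec : Claim_equal_lagged_iterate := by
  intro sequence head tail _
  exact lagged_iterate_eq sequence head tail
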